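-- pv_equiv track=rewrite | github.com/dave-sbs/cs466 | code/dream_chunks/chunking.py | _split_into_stanzas_text
-- ===== SOURCE A (Python) =====
-- from typing import Iterable
--
-- def _join_nonempty(lines: Iterable[str]) -> str:
--     parts = [str(l).strip() for l in lines if str(l).strip()]
--     return " / ".join(parts)
--
-- def _split_into_stanzas_text(lines: list[str]) -> list[str]:
--     stanzas: list[str] = []
--     current: list[str] = []
--     for line in lines:
--         if str(line).strip() == "":
--             if current:
--                 stanzas.append(_join_nonempty(current))
--                 current = []
--         else:
--             current.append(str(line).strip())
--     if current:
--         stanzas.append(_join_nonempty(current))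
--     return [s for s in stanzas if s.strip()]
-- ===== SOURCE B (Python) =====
-- def _split_into_stanzas_text(lines: list[str]) -> list[str]:
--     # Stage 1: find the indices of all separator (blank-when-stripped) lines.
--     # Stage 2: slice the list between consecutive separators and join each
--     # non-empty slice; a slice between cuts a,b is non-empty iff b - a > 1.
--     cuts = [-1] + [i for i, l in enumerate(lines) if str(l).strip() == ""] + [len(lines)]
--     return [
--         " / ".join(str(l).strip() for l in lines[a + 1 : b])
--         for a, b in zip(cuts, cuts[1:])
--         if b - a > 1
--     ]
-- ===== Notes on version B (the rewrite author's own statement) =====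
-- stated objective: alternative
-- what changed: Replaces A's single-pass accumulator with flush-on-blank/flush-at-end branches and a final filter by a staged index/slice approach: first collect the indices of blank lines as cut points, then emit one joined stanza per pair of consecutive cut points whose slice is non-empty.
import Mathlib
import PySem

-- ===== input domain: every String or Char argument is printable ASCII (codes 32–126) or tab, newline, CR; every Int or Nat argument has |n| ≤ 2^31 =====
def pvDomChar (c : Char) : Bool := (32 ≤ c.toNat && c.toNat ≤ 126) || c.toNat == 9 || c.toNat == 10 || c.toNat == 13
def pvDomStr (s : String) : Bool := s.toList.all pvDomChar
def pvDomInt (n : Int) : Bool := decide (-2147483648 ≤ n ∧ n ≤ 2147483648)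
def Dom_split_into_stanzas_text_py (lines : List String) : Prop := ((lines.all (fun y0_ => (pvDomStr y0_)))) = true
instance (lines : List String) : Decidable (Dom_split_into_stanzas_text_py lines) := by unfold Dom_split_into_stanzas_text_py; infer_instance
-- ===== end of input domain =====

-- B replaces A's single-pass accumulator (flush-on-blank/flush-at-end + final filter) by a
-- staged approach: collect blank-line indices as cut points, then slice between consecutive
-- cuts and join each non-empty slice (objective: alternative).

-- ===== PORT A =====
-- parts = [str(l).strip() for l in lines if str(l).strip()]; " / ".join(parts)
def pvJoinNonempty (lines : List String) : String :=
  PySem.Str.join " / " ((lines.filter (fun l => !(PySem.Str.strip l == ""))).map PySem.Str.strip)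

-- the body of A's for-loop over (stanzas, current)
def pvStepA (acc : List String × List String) (line : String) : List String × List String :=
  if PySem.Str.strip line == "" then
    if acc.2 ≠ [] then (acc.1 ++ [pvJoinNonempty acc.2], []) else acc
  else (acc.1, acc.2 ++ [PySem.Str.strip line])

def split_into_stanzas_text_py (lines : List String) : List String :=
  let r := lines.foldl pvStepA ([], [])
  let stanzas := if r.2 ≠ [] then r.1 ++ [pvJoinNonempty r.2] else r.1
  stanzas.filter (fun s => !(PySem.Str.strip s == ""))

-- ===== PORT B =====
def pvBlank (l : String) : Bool := PySem.Str.strip l == ""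

-- [i for i, l in enumerate(lines) if str(l).strip() == ""]
def pvBounds (lines : List String) : List Int :=
  ((PySem.List.enumerate lines 0).filter (fun p => pvBlank p.2)).map (·.1)

-- cuts = [-1] + blanks + [len(lines)]
def pvCuts (lines : List String) : List Int :=
  -1 :: (pvBounds lines ++ [(lines.length : Int)])

-- zip(cuts, cuts[1:])
def pvPairs (L : List Int) : List (Int × Int) := L.zip L.tail

-- " / ".join(str(l).strip() for l in lines[a+1:b])
def pvBody (lines : List String) (p : Int × Int) : String :=
  PySem.Str.join " / " ((PySem.List.slice lines (some (p.1 + 1)) (some p.2)).map PySem.Str.strip)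

def split_into_stanzas_text_py_alt (lines : List String) : List String :=
  ((pvPairs (pvCuts lines)).filter (fun p => decide (p.2 - p.1 > 1))).map (pvBody lines)

-- ===== PRECONDITION & SPEC =====
def Spec_split_into_stanzas_text_py (lines : List String) (out : List String) : Prop := out = split_into_stanzas_text_py_alt lines
instance (lines : List String) (out : List String) : Decidable (Spec_split_into_stanzas_text_py lines out) := by unfold Spec_split_into_stanzas_text_py; infer_instance

-- ===== CLAIM (what is proved, stated in full; the proofs are below) =====
def Claim_equal_split_into_stanzas_text_py : Prop := ∀ (lines : List String), Dom_split_into_stanzas_text_py lines → Spec_split_into_stanzas_text_py lines (split_into_stanzas_text_py lines)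

-- ===== LEMMAS AND PROOFS =====

-- ---- string/strip facts (shared by both sides) ----
theorem pv_head?_dropWhile {α : Type} (q : α → Bool) (l : List α) (a : α)
    (h : (l.dropWhile q).head? = some a) : q a = false := by
  induction l with
  | nil => simp at h
  | cons b t ih =>
    by_cases hb : q b = true
    · rw [List.dropWhile_cons, if_pos hb] at h; exact ih h
    · rw [List.dropWhile_cons, if_neg hb] at h
      simp at h
      subst h
      simpa using hb

theorem pv_dropWhile_eq_self {α : Type} (q : α → Bool) (l : List α)
    (h : ∀ a, l.head? = some a → q a = false) : l.dropWhile q = l := by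
  cases l with
  | nil => rfl
  | cons b t => rw [List.dropWhile_cons, if_neg (by simp [h b rfl])]

theorem pv_strip_eq_nil_iff (cs : List Char) :
    PySem.Chars.strip cs = [] ↔ ∀ c ∈ cs, PySem.Chars.isspace c = true := by
  unfold PySem.Chars.strip PySem.Chars.rstrip PySem.Chars.lstrip
  rw [List.reverse_eq_nil_iff, List.dropWhile_eq_nil_iff]
  simp only [List.mem_reverse]
  constructor
  · intro h c hc
    by_cases hsp : PySem.Chars.isspace c = true
    · exact hsp
    · rw [← List.takeWhile_append_dropWhile (p := PySem.Chars.isspace) (l := cs)] at hc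
      rcases List.mem_append.mp hc with h' | h'
      · exact absurd (List.mem_takeWhile_imp h') hsp
      · exact h c h'
  · intro h c hc
    exact h c ((List.dropWhile_sublist _).mem hc)

theorem pv_strip_idem (cs : List Char) :
    PySem.Chars.strip (PySem.Chars.strip cs) = PySem.Chars.strip cs := by
  by_cases h0 : PySem.Chars.strip cs = []
  · rw [h0]; rfl
  · have hs : PySem.Chars.strip cs
        = ((cs.dropWhile PySem.Chars.isspace).reverse.dropWhile PySem.Chars.isspace).reverse := rfl
    generalize hw : (cs.dropWhile PySem.Chars.isspace).reverse.dropWhile PySem.Chars.isspace = w at hs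
    have hwne : w ≠ [] := by
      intro h; apply h0; rw [hs, h]; rfl
    have hwhead : ∀ a, w.head? = some a → PySem.Chars.isspace a = false := by
      intro a ha; exact pv_head?_dropWhile _ _ _ (hw ▸ ha)
    have hwlast : ∀ a, w.getLast? = some a → PySem.Chars.isspace a = false := by
      intro a ha
      have hsuf : w <:+ (cs.dropWhile PySem.Chars.isspace).reverse := by
        rw [← hw]; exact List.dropWhile_suffix _
      obtain ⟨t, ht⟩ := hsuf
      have h2 : ((cs.dropWhile PySem.Chars.isspace).reverse).getLast? = some a := by
        rw [← ht, List.getLast?_append, ha]; rfl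
      rw [List.getLast?_reverse] at h2
      exact pv_head?_dropWhile _ cs a h2
    have hinner : List.dropWhile PySem.Chars.isspace w.reverse = w.reverse :=
      pv_dropWhile_eq_self _ _ (by
        intro a ha; rw [List.head?_reverse] at ha; exact hwlast a ha)
    rw [hs]
    show PySem.Chars.strip w.reverse = w.reverse
    unfold PySem.Chars.strip PySem.Chars.rstrip PySem.Chars.lstrip
    rw [hinner, List.reverse_reverse, pv_dropWhile_eq_self _ _ hwhead]

theorem pv_strip_ne_nil_of_mem (cs : List Char) (c : Char) (hc : c ∈ cs)
    (hsp : PySem.Chars.isspace c = false) : PySem.Chars.strip cs ≠ [] := by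
  intro h
  rw [pv_strip_eq_nil_iff] at h
  rw [h c hc] at hsp
  exact absurd hsp (by simp)

theorem pv_exists_nonspace (cs : List Char) (h : PySem.Chars.strip cs ≠ []) :
    ∃ c ∈ PySem.Chars.strip cs, PySem.Chars.isspace c = false := by
  by_contra hcon
  apply h
  rw [← pv_strip_idem cs, pv_strip_eq_nil_iff]
  intro c hc
  by_cases hx : PySem.Chars.isspace c = true
  · exact hx
  · exact absurd ⟨c, hc, by simpa using hx⟩ hcon

theorem pv_blank_iff (l : String) : pvBlank l = true ↔ PySem.Chars.strip l.toList = [] := by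
  unfold pvBlank
  rw [beq_iff_eq, ← String.toList_inj]
  simp only [PySem.Str.toList_strip, String.toList_empty]

theorem pv_str_strip_idem (s : String) :
    PySem.Str.strip (PySem.Str.strip s) = PySem.Str.strip s := by
  rw [← String.toList_inj]
  simp only [PySem.Str.toList_strip]
  exact pv_strip_idem s.toList

-- A's _join_nonempty on already-stripped non-blank parts is the plain join
theorem pv_join_eq (p : List String) (hp : ∀ x ∈ p, pvBlank x = false) :
    pvJoinNonempty (p.map PySem.Str.strip) = PySem.Str.join " / " (p.map PySem.Str.strip) := by
  unfold pvJoinNonempty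
  have hf : (p.map PySem.Str.strip).filter (fun l => !(PySem.Str.strip l == "")) = p.map PySem.Str.strip := by
    rw [List.filter_eq_self]
    intro a ha
    obtain ⟨x, hx, rfl⟩ := List.mem_map.mp ha
    have : pvBlank (PySem.Str.strip x) = false := by
      unfold pvBlank
      rw [pv_str_strip_idem]
      exact hp x hx
    simpa [pvBlank] using this
  rw [hf, List.map_map, Function.comp_def, List.map_congr_left (g := PySem.Str.strip) (fun a _ => pv_str_strip_idem a)]

-- a stanza built from a non-empty run of non-blank lines is itself non-blank
theorem pv_stanza_nonblank (p : List String) (hne : p ≠ []) (hp : ∀ x ∈ p, pvBlank x = false) :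
    pvBlank (PySem.Str.join " / " (p.map PySem.Str.strip)) = false := by
  cases p with
  | nil => exact absurd rfl hne
  | cons x0 ps =>
    have hx0 : pvBlank x0 = false := hp x0 (by simp)
    have hstrip : PySem.Chars.strip x0.toList ≠ [] := by
      intro h; rw [← pv_blank_iff] at h; rw [h] at hx0; exact absurd hx0 (by simp)
    obtain ⟨c, hc, hcsp⟩ := pv_exists_nonspace _ hstrip
    have hcjoin : c ∈ (PySem.Str.join " / " ((x0 :: ps).map PySem.Str.strip)).toList := by
      rw [PySem.Str.toList_join]
      have hmem0 : c ∈ (PySem.Str.strip x0).toList := by rw [PySem.Str.toList_strip]; exact hc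
      cases ps with
      | nil => simpa [PySem.Chars.join_singleton] using hmem0
      | cons q qs =>
        simp only [List.map_cons, PySem.Chars.join_cons_cons]
        exact List.mem_append.mpr (Or.inl (List.mem_append.mpr (Or.inl hmem0)))
    have := pv_strip_ne_nil_of_mem _ c hcjoin hcsp
    simp only [pvBlank]
    rw [beq_eq_false_iff_ne]
    intro h
    apply this
    rw [← PySem.Str.toList_strip, h]
    rfl

-- ---- cut/slice machinery for B ----

theorem pv_enum_shift {α : Type} (xs : List α) (s : Int) :
    PySem.List.enumerate xs (s + 1) = (PySem.List.enumerate xs s).map (fun p => (p.1 + 1, p.2)) := by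
  induction xs generalizing s with
  | nil => simp [PySem.List.enumerate_nil]
  | cons x t ih =>
    rw [PySem.List.enumerate_cons, PySem.List.enumerate_cons, List.map_cons, ih (s + 1)]

theorem pv_bounds_cons (l : String) (rest : List String) :
    pvBounds (l :: rest)
      = (if pvBlank l then [(0 : Int)] else []) ++ (pvBounds rest).map (· + 1) := by
  unfold pvBounds
  rw [PySem.List.enumerate_cons, show (0 : Int) + 1 = 0 + 1 by ring, pv_enum_shift]
  rw [List.filter_cons]
  by_cases hl : pvBlank l = true
  · simp [hl, List.filter_map, Function.comp_def, List.map_map]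
  · simp [hl, List.filter_map, Function.comp_def, List.map_map]

theorem pv_bounds_nonneg (lines : List String) : ∀ x ∈ pvBounds lines, 0 ≤ x := by
  intro x hx
  unfold pvBounds at hx
  obtain ⟨p, hp, rfl⟩ := List.mem_map.mp hx
  have hpm := (List.mem_filter.mp hp).1
  obtain ⟨k, hk, rfl⟩ := (PySem.List.mem_enumerate_iff _ _ _).mp hpm
  simp

theorem pv_cuts_ge (lines : List String) : ∀ x ∈ pvCuts lines, -1 ≤ x := by
  intro x hx
  unfold pvCuts at hx
  rcases List.mem_cons.mp hx with rfl | hx'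
  · exact le_refl _
  · rcases List.mem_append.mp hx' with h | h
    · exact le_trans (by omega) (pv_bounds_nonneg lines x h)
    · simp at h; omega

-- slice shift: dropping a length-k prefix shifts both nonneg bounds by k
theorem pv_slice_shift {α : Type} (front xs : List α) (i j : Int) (hi : 0 ≤ i) (hj : 0 ≤ j) :
    PySem.List.slice (front ++ xs) (some (i + front.length)) (some (j + front.length))
      = PySem.List.slice xs (some i) (some j) := by
  obtain ⟨m, rfl⟩ := Int.eq_ofNat_of_zero_le hi
  obtain ⟨q, rfl⟩ := Int.eq_ofNat_of_zero_le hj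
  have h1 : ((m : Int) + front.length) = ((m + front.length : Nat) : Int) := by push_cast; ring
  have h2 : ((q : Int) + front.length) = ((q + front.length : Nat) : Int) := by push_cast; ring
  rw [h1, h2, PySem.List.slice_natCast, PySem.List.slice_natCast,
    show m + front.length = front.length + m by omega,
    List.drop_length_add_append,
    show q + front.length - (front.length + m) = q - m by omega]

theorem pv_pairs_map_shift (k : Int) (L : List Int) :
    pvPairs (L.map (· + k)) = (pvPairs L).map (fun p => (p.1 + k, p.2 + k)) := by
  unfold pvPairs
  rw [← List.map_tail, List.zip_map]
  rfl

theorem pv_mem_pairs (L : List Int) (p : Int × Int) (hp : p ∈ pvPairs L) :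
    p.1 ∈ L ∧ p.2 ∈ L := by
  unfold pvPairs at hp
  obtain ⟨h1, h2⟩ := List.of_mem_zip hp
  exact ⟨h1, L.tail_sublist.mem h2⟩

theorem pv_pairs_cons (a b : Int) (L : List Int) :
    pvPairs (a :: b :: L) = (a, b) :: pvPairs (b :: L) := rfl

-- the shift congruence: filtered/mapped pairs over shifted cuts describe the suffix
theorem pv_shift (front xs : List String) (L : List Int) (hL : ∀ x ∈ L, -1 ≤ x) :
    ((pvPairs (L.map (· + (front.length : Int)))).filter (fun p => decide (p.2 - p.1 > 1))).map
        (pvBody (front ++ xs))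
      = ((pvPairs L).filter (fun p => decide (p.2 - p.1 > 1))).map (pvBody xs) := by
  rw [pv_pairs_map_shift]
  rw [List.filter_map, List.map_map]
  have hpred : ((fun p : Int × Int => decide (p.2 - p.1 > 1)) ∘ fun p => (p.1 + (front.length : Int), p.2 + (front.length : Int)))
      = (fun p : Int × Int => decide (p.2 - p.1 > 1)) := by
    funext p
    simp only [Function.comp_apply]
    rw [decide_eq_decide]
    omega
  rw [hpred]
  apply List.map_congr_left
  intro p hp
  have hmem := (List.mem_filter.mp hp).1
  have hgt : p.2 - p.1 > 1 := by simpa using (List.mem_filter.mp hp).2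
  obtain ⟨h1, h2⟩ := pv_mem_pairs L p hmem
  have hp1 : -1 ≤ p.1 := hL _ h1
  unfold pvBody
  simp only [Function.comp]
  rw [show p.1 + (front.length : Int) + 1 = (p.1 + 1) + front.length by ring,
    pv_slice_shift front xs (p.1 + 1) p.2 (by omega) (by omega)]

theorem pv_alt_nil : split_into_stanzas_text_py_alt [] = [] := by decide

-- a leading blank line is skipped
theorem pv_alt_skip (l : String) (rest : List String) (hl : pvBlank l = true) :
    split_into_stanzas_text_py_alt (l :: rest) = split_into_stanzas_text_py_alt rest := by
  unfold split_into_stanzas_text_py_alt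
  have hcuts : pvCuts (l :: rest) = -1 :: (pvCuts rest).map (· + 1) := by
    unfold pvCuts
    rw [pv_bounds_cons, if_pos hl]
    simp
  have hrw : (pvCuts rest).map (· + (1 : Int))
      = 0 :: ((pvBounds rest ++ [(rest.length : Int)]).map (· + 1)) := by
    unfold pvCuts; simp
  rw [hcuts, hrw, pv_pairs_cons, List.filter_cons_of_neg (by decide), ← hrw]
  have := pv_shift [l] rest (pvCuts rest) (pv_cuts_ge rest)
  simpa using this

-- bounds of a non-blank run followed by anything: just the tail's bounds, shifted
theorem pv_bounds_run (p tail : List String) (hp : ∀ x ∈ p, pvBlank x = false) :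
    pvBounds (p ++ tail) = (pvBounds tail).map (· + (p.length : Int)) := by
  induction p with
  | nil => simp
  | cons x t ih =>
    rw [List.cons_append, pv_bounds_cons, if_neg (by simp [hp x (by simp)]),
      ih (fun y hy => hp y (by simp [hy]))]
    rw [List.nil_append, List.map_map]
    apply List.map_congr_left
    intro a _
    simp only [Function.comp_apply, List.length_cons]
    push_cast
    ring

-- the tail part of pvCuts starts with 0 when the tail is empty or starts blank
theorem pv_cuts_tail_zero (tail : List String)
    (htail : ∀ a, tail.head? = some a → pvBlank a = true) :
    ∃ R', pvBounds tail ++ [(tail.length : Int)] = 0 :: R' := by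
  cases tail with
  | nil => exact ⟨[], by simp [pvBounds, PySem.List.enumerate_nil]⟩
  | cons t0 ts =>
    have h0 : pvBlank t0 = true := htail t0 rfl
    refine ⟨(pvBounds ts).map (· + 1) ++ [((ts.length + 1 : Nat) : Int)], ?_⟩
    rw [pv_bounds_cons, if_pos h0]
    simp

-- a maximal non-blank run produces one stanza, then the rest
theorem pv_alt_run (x0 : String) (ps tail : List String)
    (hp : ∀ x ∈ (x0 :: ps), pvBlank x = false)
    (htail : ∀ a, tail.head? = some a → pvBlank a = true) :
    split_into_stanzas_text_py_alt ((x0 :: ps) ++ tail)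
      = PySem.Str.join " / " ((x0 :: ps).map PySem.Str.strip)
          :: split_into_stanzas_text_py_alt tail := by
  obtain ⟨R', hR'⟩ := pv_cuts_tail_zero tail htail
  have hRge : ∀ x ∈ (0 : Int) :: R', -1 ≤ x := by
    intro x hx
    rw [← hR'] at hx
    rcases List.mem_append.mp hx with h | h
    · exact le_trans (by omega) (pv_bounds_nonneg tail x h)
    · simp at h; omega
  have hk1 : (1 : Int) ≤ ((x0 :: ps).length : Int) := by simp
  -- cuts of the combined list
  have hcuts : pvCuts ((x0 :: ps) ++ tail)
      = -1 :: (((0 : Int) :: R').map (· + ((x0 :: ps).length : Int))) := by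
    unfold pvCuts
    rw [pv_bounds_run _ _ hp, ← hR']
    simp
    omega
  -- cuts of the tail
  have hcutsT : pvCuts tail = -1 :: (0 : Int) :: R' := by
    unfold pvCuts; rw [hR']
  unfold split_into_stanzas_text_py_alt
  rw [hcuts, hcutsT]
  have hpairsC : pvPairs (-1 :: (((0 : Int) :: R').map (· + ((x0 :: ps).length : Int))))
      = (-1, 0 + ((x0 :: ps).length : Int))
          :: pvPairs (((0 : Int) :: R').map (· + ((x0 :: ps).length : Int))) := rfl
  have hpairsT : pvPairs (-1 :: (0 : Int) :: R') = (-1, 0) :: pvPairs ((0 : Int) :: R') := rfl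
  rw [hpairsC, hpairsT,
    List.filter_cons_of_pos (by rw [decide_eq_true_eq]; omega),
    List.filter_cons_of_neg (by decide),
    List.map_cons]
  have hshift := pv_shift (x0 :: ps) tail ((0 : Int) :: R') hRge
  rw [hshift]
  congr 1
  -- first stanza: slice of the combined list from 0 to |x0::ps| is the run itself
  unfold pvBody
  rw [show (-1 : Int) + 1 = ((0 : Nat) : Int) by simp,
    show (0 : Int) + ((x0 :: ps).length : Int) = (((x0 :: ps).length : Nat) : Int) by simp,
    PySem.List.slice_natCast]
  simp

theorem pv_alt_all_nonblank_aux (n : Nat) : ∀ (lines : List String), lines.length ≤ n →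
    ∀ s ∈ split_into_stanzas_text_py_alt lines, pvBlank s = false := by
  induction n with
  | zero =>
    intro lines hlen s hs
    rw [List.length_eq_zero_iff.mp (Nat.le_zero.mp hlen)] at hs
    rw [pv_alt_nil] at hs
    simp at hs
  | succ n ih =>
    intro lines hlen s hs
    cases lines with
    | nil => rw [pv_alt_nil] at hs; simp at hs
    | cons l rest =>
      by_cases hl : pvBlank l = true
      · rw [pv_alt_skip l rest hl] at hs
        exact ih rest (by simp at hlen; omega) s hs
      · have hl' : pvBlank l = false := by simpa using hl
        have hdecomp : l :: rest
            = (l :: rest.takeWhile (fun x => !pvBlank x)) ++ rest.dropWhile (fun x => !pvBlank x) := by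
          rw [List.cons_append, List.takeWhile_append_dropWhile]
        rw [hdecomp] at hs
        rw [pv_alt_run l (rest.takeWhile (fun x => !pvBlank x)) (rest.dropWhile (fun x => !pvBlank x))
          (by
            intro x hx
            rcases List.mem_cons.mp hx with rfl | hx'
            · exact hl'
            · simpa using List.mem_takeWhile_imp hx')
          (by
            intro a ha
            have := pv_head?_dropWhile (fun x => !pvBlank x) rest a ha
            simpa using this)] at hs
        rcases List.mem_cons.mp hs with rfl | hs'
        · exact pv_stanza_nonblank _ (by simp)
            (by
              intro x hx
              rcases List.mem_cons.mp hx with rfl | hx'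
              · exact hl'
              · simpa using List.mem_takeWhile_imp hx')
        · exact ih _ (le_trans (List.length_dropWhile_le _ _) (by simp at hlen; omega)) s hs'

theorem pv_alt_all_nonblank (lines : List String) :
    ∀ s ∈ split_into_stanzas_text_py_alt lines, pvBlank s = false :=
  pv_alt_all_nonblank_aux lines.length lines (le_refl _)

-- the main loop invariant: A's fold with pending run p equals B on p ++ lines
theorem pv_main (lines : List String) : ∀ (st : List String) (p : List String),
    (∀ x ∈ p, pvBlank x = false) →
    (let r := lines.foldl pvStepA (st, p.map PySem.Str.strip)
     if r.2 ≠ [] then r.1 ++ [pvJoinNonempty r.2] else r.1)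
    = st ++ split_into_stanzas_text_py_alt (p ++ lines) := by
  induction lines with
  | nil =>
    intro st p hp
    cases p with
    | nil => simp [pv_alt_nil]
    | cons x0 ps =>
      simp only [List.foldl_nil, List.append_nil]
      rw [if_pos (show (List.map PySem.Str.strip (x0 :: ps)) ≠ [] from by simp)]
      rw [pv_join_eq _ hp]
      rw [show ((x0 :: ps) : List String) = (x0 :: ps) ++ [] by simp,
        pv_alt_run x0 ps [] hp (by simp), pv_alt_nil]
      simp
  | cons l rest ih =>
    intro st p hp
    by_cases hl : pvBlank l = true
    · have hstep : ∀ c, pvStepA (st, c) l = if c ≠ [] then (st ++ [pvJoinNonempty c], []) else (st, c) := by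
        intro c
        unfold pvStepA
        rw [if_pos (by simpa [pvBlank] using hl)]
      cases p with
      | nil =>
        rw [List.map_nil, List.foldl_cons, hstep,
          if_neg (show ¬(([] : List String) ≠ []) from by simp)]
        have hih := ih st [] (by simp)
        simp only [List.map_nil, List.nil_append] at hih
        rw [List.nil_append, pv_alt_skip l rest hl]
        exact hih
      | cons x0 ps =>
        rw [List.foldl_cons, hstep,
          if_pos (show (List.map PySem.Str.strip (x0 :: ps)) ≠ [] from by simp)]
        have hih := ih (st ++ [pvJoinNonempty (List.map PySem.Str.strip (x0 :: ps))]) [] (by simp)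
        simp only [List.map_nil, List.nil_append] at hih
        rw [hih]
        have hgp : split_into_stanzas_text_py_alt ((x0 :: ps) ++ (l :: rest))
            = PySem.Str.join " / " ((x0 :: ps).map PySem.Str.strip)
              :: split_into_stanzas_text_py_alt (l :: rest) :=
          pv_alt_run x0 ps (l :: rest) hp
            (by intro a ha; rw [List.head?_cons, Option.some_inj] at ha; exact ha ▸ hl)
        rw [hgp, pv_alt_skip l rest hl, pv_join_eq _ hp]
        simp
    · have hl' : pvBlank l = false := by simpa using hl
      rw [List.foldl_cons]
      have hstep : pvStepA (st, p.map PySem.Str.strip) l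
          = (st, (p ++ [l]).map PySem.Str.strip) := by
        unfold pvStepA
        rw [if_neg (show ¬(PySem.Str.strip l == "") = true from by simpa [pvBlank] using hl')]
        simp
      rw [hstep]
      have hih := ih st (p ++ [l]) (by
        intro x hx
        rcases List.mem_append.mp hx with h | h
        · exact hp x h
        · simp at h; rw [h]; exact hl')
      rw [hih, List.append_assoc]
      rfl

-- ===== VERDICT (by name: the statement is the Claim_ definition above) =====
theorem split_into_stanzas_text_py_spec : Claim_equal_split_into_stanzas_text_py := by
  intro lines _
  unfold Spec_split_into_stanzas_text_py
  have h := pv_main lines [] [] (by simp)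
  simp only [List.map_nil, List.nil_append] at h
  show List.filter (fun s => !(PySem.Str.strip s == ""))
      (if (List.foldl pvStepA ([], []) lines).2 ≠ []
        then (List.foldl pvStepA ([], []) lines).1 ++ [pvJoinNonempty (List.foldl pvStepA ([], []) lines).2]
        else (List.foldl pvStepA ([], []) lines).1)
    = split_into_stanzas_text_py_alt lines
  rw [h, List.filter_eq_self]
  intro s hs
  simpa [pvBlank] using pv_alt_all_nonblank lines s hs
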